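-- pv_equiv track=rewrite | github.com/nitinreddyk10/Algorithm-Lab | lab01/extra.py | get_string
-- ===== SOURCE A (Python) =====
-- def get_string(a, b, a_ind, b_ind, a_count, b_count, str):
--     str1, str2 = "", ""
--     if a_ind >= len(a):
--         return str
--     a_ind_next = a_ind + a_count[a_ind]
--     try:
--         b_ind_next = b.index(a[a_ind], b_ind)
--         # b_len_next = b_count[b_ind_next+1]
--         # a_len_next = a.index(b[b_ind_next+b_len_next], a_ind) - a_ind
--         # if b_len_next > a_len_next:
--         str1 =  get_string(b, a, b_ind_next+1, a_ind_next, b_count, a_count, str+a[a_ind:a_ind_next])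
--     except ValueError:
--         pass
--     except KeyError:
--         # return str
--         pass
--
--     str2 = get_string(a, b, a_ind_next, b_ind, a_count, b_count, str+a[a_ind:a_ind_next])
--
--     if len(str1) < len(str2):
--         return str2
--     else:
--         return str1
-- ===== SOURCE B (Python) =====
-- from functools import lru_cache
--
-- def get_string(a, b, a_ind, b_ind, a_count, b_count, str):
--     # Memoized DP on the state (fromA, i, j); each state returns a pair
--     # (total length, tuple of segments) instead of threading an accumulator
--     # string through the recursion; the segments are joined once at the end.
--     @lru_cache(maxsize=None)
--     def best(fromA, i, j):
--         x = a if fromA else b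
--         xc = a_count if fromA else b_count
--         y = b if fromA else a
--         if i >= len(x):
--             return (0, ())
--         i2 = i + xc[i]
--         seg = x[i:i2]
--         pos = y.find(x[i], j)
--         cands = []
--         if pos != -1:
--             cands.append(best(not fromA, pos + 1, i2))
--         cands.append(best(fromA, i2, j))
--         length, rest = max(cands, key=lambda t: t[0])
--         return (len(seg) + length, (seg,) + rest)
--
--     return str + "".join(best(True, a_ind, b_ind)[1])
-- ===== Notes on version B (the rewrite author's own statement) =====
-- stated objective: alternative
-- what changed: A's accumulator-threading, argument-swapping double recursion is replaced by an lru_cache-memoized recursion on the state (fromA, i, j) that returns (length, tuple-of-segments) pairs — no prefix string is threaded through, the comparison uses the cached lengths, and the segments are joined once at the end.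
-- outside the precondition, e.g. on get_string('ab', 'ab', -1, 0, [1, 1], [1, 1], ''): A returns 'ab', B returns 'ab'; on get_string('ab', 'b', -2, 0, [1, 1], [1], ''): A returns 'aab', B returns 'aab'
import Mathlib
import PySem

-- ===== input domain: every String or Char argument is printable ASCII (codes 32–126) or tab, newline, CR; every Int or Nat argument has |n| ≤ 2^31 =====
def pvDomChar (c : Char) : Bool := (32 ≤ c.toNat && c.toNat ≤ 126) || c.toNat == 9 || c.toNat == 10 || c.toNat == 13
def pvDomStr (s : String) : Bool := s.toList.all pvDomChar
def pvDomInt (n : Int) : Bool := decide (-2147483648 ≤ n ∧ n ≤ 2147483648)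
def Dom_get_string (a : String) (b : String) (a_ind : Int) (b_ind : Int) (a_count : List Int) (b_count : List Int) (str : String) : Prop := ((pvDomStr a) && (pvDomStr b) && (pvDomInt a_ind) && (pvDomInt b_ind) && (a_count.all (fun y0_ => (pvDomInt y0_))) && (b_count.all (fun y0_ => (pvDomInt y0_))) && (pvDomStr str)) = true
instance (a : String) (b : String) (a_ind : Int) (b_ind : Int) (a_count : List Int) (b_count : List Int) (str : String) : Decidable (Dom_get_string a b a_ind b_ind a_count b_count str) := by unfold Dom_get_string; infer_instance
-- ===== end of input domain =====

-- B replaces A's accumulator-threading, argument-swapping double recursion by a memoized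
-- recursion on the state (fromA, i, j) that returns a (length, segment-list) pair and joins
-- the segments once at the end (objective: alternative).

-- ===== PORT A =====
-- A's recursion is not structurally decreasing on all inputs (it diverges when a reachable
-- count is ≤ 0), so the port uses a fuel parameter; fuel len(a)+len(b)+1 is never exhausted
-- on inputs satisfying Pre_, and the fuel-0 / IndexError defaults are only reached outside Pre_.
def pvGsA : Nat → List Char → List Char → Int → Int → List Int → List Int → List Char → List Char
  | 0, _, _, _, _, _, _, s => s      -- fuel exhausted: unreachable under Pre_
  | n+1, a, b, a_ind, b_ind, a_count, b_count, s =>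
    if PySem.List.len a ≤ a_ind then s      -- if a_ind >= len(a): return str
    else
      match PySem.List.pyGet? a_count a_ind, PySem.List.pyGet? a a_ind with
      | some c, some ch =>
          -- b.index(a[a_ind], b_ind): findFrom = -1 is exactly the caught ValueError
          let pos := PySem.Chars.findFrom b [ch] b_ind none
          let seg := PySem.List.slice a (some a_ind) (some (a_ind + c))
          let str1 := if pos = -1 then []
                      else pvGsA n b a (pos + 1) (a_ind + c) b_count a_count (s ++ seg)
          let str2 := pvGsA n a b (a_ind + c) b_ind a_count b_count (s ++ seg)
          if str1.length < str2.length then str2 else str1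
      | _, _ => s      -- uncaught IndexError in Python: excluded by Pre_

def get_string (a : String) (b : String) (a_ind : Int) (b_ind : Int) (a_count : List Int) (b_count : List Int) (str : String) : String :=
  String.ofList (pvGsA (a.toList.length + b.toList.length + 1) a.toList b.toList a_ind b_ind a_count b_count str.toList)

-- ===== PORT B =====
-- Source B's memoized closure best(fromA, i, j) is ported as a plain fuel recursion (lru_cache
-- only caches values, it does not change them); a, b and the count lists are passed through
-- unchanged and the Bool flag selects x/xc/y exactly as the Python closure does.
-- Python's max(cands, key=…) returns the FIRST maximal element; with cands = [s1, s2] that is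
-- 'if s1.1 < s2.1 then s2 else s1', and with cands = [s2] it is s2 — ported as those branches.
def pvBestB : Nat → List Char → List Char → List Int → List Int → Bool → Int → Int → Int × List (List Char)
  | 0, _, _, _, _, _, _, _ => (0, [])      -- fuel exhausted: unreachable under Pre_
  | n+1, a, b, ca, cb, fromA, i, j =>
    let x := cond fromA a b
    let xc := cond fromA ca cb
    let y := cond fromA b a
    if PySem.List.len x ≤ i then (0, [])
    else
      match PySem.List.pyGet? xc i, PySem.List.pyGet? x i with
      | some c, some ch =>
          let seg := PySem.List.slice x (some i) (some (i + c))
          let pos := PySem.Chars.findFrom y [ch] j none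
          let chosen :=
            if pos = -1 then pvBestB n a b ca cb fromA (i + c) j
            else
              let s1 := pvBestB n a b ca cb (!fromA) (pos + 1) (i + c)
              let s2 := pvBestB n a b ca cb fromA (i + c) j
              if s1.1 < s2.1 then s2 else s1
          (PySem.List.len seg + chosen.1, seg :: chosen.2)
      | _, _ => (0, [])      -- xc[i] IndexError in Python: excluded by Pre_

def get_string_alt (a : String) (b : String) (a_ind : Int) (b_ind : Int) (a_count : List Int) (b_count : List Int) (str : String) : String :=
  String.ofList (str.toList ++ (pvBestB (a.toList.length + b.toList.length + 1) a.toList b.toList a_count b_count true a_ind b_ind).2.flatten)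

-- ===== PRECONDITION & SPEC =====
-- Pre_ admits every input on which A returns at once (a_ind ≥ len(a)) and the function's natural
-- domain: non-negative a_ind, any b_ind, a count list covering each string, positive relevant
-- counts. Outside it A diverges (a reachable count ≤ 0) or raises IndexError (count list shorter
-- than its string, a_ind below -len(a)); it also excludes the negative-a_ind / non-positive-count
-- corners on which A still happens to return via index wraparound — B agrees with A there in
-- testing, but A's termination there is accidental and not a closed-form condition on the input.
def Pre_get_string (a : String) (b : String) (a_ind : Int) (b_ind : Int) (a_count : List Int) (b_count : List Int) (str : String) : Prop :=
  (a.toList.length : Int) ≤ a_ind ∨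
  (0 ≤ a_ind ∧ a.toList.length ≤ a_count.length ∧ b.toList.length ≤ b_count.length ∧
    (∀ c ∈ a_count.take a.toList.length, 1 ≤ c) ∧ (∀ c ∈ b_count.take b.toList.length, 1 ≤ c))
instance (a : String) (b : String) (a_ind : Int) (b_ind : Int) (a_count : List Int) (b_count : List Int) (str : String) : Decidable (Pre_get_string a b a_ind b_ind a_count b_count str) := by unfold Pre_get_string; infer_instance

def pvWitness_get_string : String × String × Int × Int × List Int × List Int × String :=
  ("ab", "ba", 0, 0, [1, 1], [1, 1], "")

def Spec_get_string (a : String) (b : String) (a_ind : Int) (b_ind : Int) (a_count : List Int) (b_count : List Int) (str : String) (out : String) : Prop := out = get_string_alt a b a_ind b_ind a_count b_count str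
instance (a : String) (b : String) (a_ind : Int) (b_ind : Int) (a_count : List Int) (b_count : List Int) (str : String) (out : String) : Decidable (Spec_get_string a b a_ind b_ind a_count b_count str out) := by unfold Spec_get_string; infer_instance

-- ===== CLAIM (what is proved, stated in full; the proofs are below) =====
def Claim_equal_get_string : Prop := ∀ (a : String) (b : String) (a_ind : Int) (b_ind : Int) (a_count : List Int) (b_count : List Int) (str : String), Dom_get_string a b a_ind b_ind a_count b_count str → Pre_get_string a b a_ind b_ind a_count b_count str → Spec_get_string a b a_ind b_ind a_count b_count str (get_string a b a_ind b_ind a_count b_count str)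

-- ===== LEMMAS AND PROOFS =====

-- findFrom is -1 or a valid non-negative index.
theorem pvFindFrom_dichot (s sub : List Char) (j : Int) :
    PySem.Chars.findFrom s sub j none = -1 ∨ 0 ≤ PySem.Chars.findFrom s sub j none := by
  have dich : ∀ l : List Char, PySem.Chars.find l sub = -1 ∨ 0 ≤ PySem.Chars.find l sub := by
    intro l
    by_cases hx : sub <:+: l
    · exact Or.inr ((PySem.Chars.find_nonneg_iff l sub).mpr hx)
    · exact Or.inl ((PySem.Chars.find_eq_neg_one_iff l sub).mpr hx)
  have main : ∀ st : Int, 0 ≤ st →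
      (if ((s.length : Nat) : Int) < st then (-1 : Int)
       else if PySem.Chars.find (List.drop st.toNat (List.take ((s.length : Nat) : Int).toNat s)) sub = -1 then -1
       else st + PySem.Chars.find (List.drop st.toNat (List.take ((s.length : Nat) : Int).toNat s)) sub) = -1 ∨
      0 ≤ (if ((s.length : Nat) : Int) < st then (-1 : Int)
       else if PySem.Chars.find (List.drop st.toNat (List.take ((s.length : Nat) : Int).toNat s)) sub = -1 then -1
       else st + PySem.Chars.find (List.drop st.toNat (List.take ((s.length : Nat) : Int).toNat s)) sub) := by
    intro st hst
    split_ifs with hA hB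
    · exact Or.inl rfl
    · exact Or.inl rfl
    · refine Or.inr ?_
      rcases dich (List.drop st.toNat (List.take ((s.length : Nat) : Int).toNat s)) with h | h
      · exact absurd h hB
      · omega
  unfold PySem.Chars.findFrom
  simp only
  exact main _ (by split_ifs <;> omega)

theorem pvSlice_len_pos (a : List Char) (i i2 : Int) (hi : 0 ≤ i)
    (hlt : i < (a.length : Int)) (hstep : i + 1 ≤ i2) :
    1 ≤ (PySem.List.slice a (some i) (some i2)).length := by
  rw [PySem.List.slice_toNat a hi (by omega)]
  simp only [List.length_take, List.length_drop]
  omega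

-- The length component of pvBestB is the length of its flattened segment list.
theorem pvBestB_len (n : Nat) : ∀ (a b : List Char) (ca cb : List Int) (fromA : Bool) (i j : Int),
    (pvBestB n a b ca cb fromA i j).1 = (((pvBestB n a b ca cb fromA i j).2.flatten.length : Nat) : Int) := by
  induction n with
  | zero => intro a b ca cb fromA i j; simp [pvBestB]
  | succ n ih =>
    intro a b ca cb fromA i j
    cases fromA <;>
      simp only [pvBestB, Bool.cond_true, Bool.cond_false, Bool.not_true, Bool.not_false]
    · split_ifs with h1
      · simp
      · cases hc : PySem.List.pyGet? cb i <;> cases hch : PySem.List.pyGet? b i <;>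
          try simp
        split_ifs with hf hlt <;> simp [ih]
    · split_ifs with h1
      · simp
      · cases hc : PySem.List.pyGet? ca i <;> cases hch : PySem.List.pyGet? a i <;>
          try simp
        split_ifs with hf hlt <;> simp [ih]

-- Swapping the string/count pair is the same as flipping the flag.
theorem pvBestB_swap (n : Nat) : ∀ (a b : List Char) (ca cb : List Int) (fromA : Bool) (i j : Int),
    pvBestB n a b ca cb fromA i j = pvBestB n b a cb ca (!fromA) i j := by
  induction n with
  | zero => intro a b ca cb fromA i j; simp [pvBestB]
  | succ n ih =>
    intro a b ca cb fromA i j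
    cases fromA <;>
      simp only [pvBestB, Bool.cond_true, Bool.cond_false, Bool.not_true, Bool.not_false] <;>
      simp only [ih a b ca cb true, ih a b ca cb false, Bool.not_true, Bool.not_false]

-- Main invariant: A's accumulator recursion equals the prefix plus B's flattened segments.
theorem pvGsA_eq_bestB (n : Nat) : ∀ (a b : List Char) (i j : Int) (ca cb : List Int) (s : List Char),
    0 ≤ i → a.length ≤ ca.length → b.length ≤ cb.length →
    (∀ c ∈ ca.take a.length, 1 ≤ c) → (∀ c ∈ cb.take b.length, 1 ≤ c) →
    pvGsA n a b i j ca cb s = s ++ (pvBestB n a b ca cb true i j).2.flatten := by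
  induction n with
  | zero => intro a b i j ca cb s _ _ _ _ _; simp [pvGsA, pvBestB]
  | succ n ih =>
    intro a b i j ca cb s hi hca hcb hqa hqb
    by_cases hbase : PySem.List.len a ≤ i
    · have hb' : ((a.length : Nat) : Int) ≤ i := by simpa [PySem.List.len_eq] using hbase
      simp [pvGsA, pvBestB, hb']
    · have hlt : i < (a.length : Int) := by
        simpa [PySem.List.len_eq] using not_le.mp hbase
      have hiN : i.toNat < a.length := by omega
      have hca' : PySem.List.pyGet? ca i = some ca[i.toNat] :=
        PySem.List.pyGet?_eq_some_getElem ca hi (by omega)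
      have ha' : PySem.List.pyGet? a i = some a[i.toNat] :=
        PySem.List.pyGet?_eq_some_getElem a hi (by omega)
      have hc : 1 ≤ ca[i.toNat] := by
        have h1 : i.toNat < (ca.take a.length).length := by
          simp only [List.length_take]; omega
        have h2 : (ca.take a.length)[i.toNat]'h1 = ca[i.toNat] := List.getElem_take
        exact hqa _ (h2 ▸ List.getElem_mem h1)
      have hseg := pvSlice_len_pos a i (i + ca[i.toNat]) hi hlt (by omega)
      simp only [pvGsA, pvBestB, if_neg hbase, Bool.cond_true, Bool.not_true, hca', ha']
      by_cases hf : PySem.Chars.findFrom b [a[i.toNat]] j none = -1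
      · rw [if_pos hf, if_pos hf]
        rw [ih a b (i + ca[i.toNat]) j ca cb
              (s ++ PySem.List.slice a (some i) (some (i + ca[i.toNat])))
              (by omega) hca hcb hqa hqb]
        rw [if_pos (by simp only [List.length_append, List.length_nil, List.length_flatten]; omega)]
        simp [List.append_assoc]
      · have hpos : 0 ≤ PySem.Chars.findFrom b [a[i.toNat]] j none :=
          (pvFindFrom_dichot b [a[i.toNat]] j).resolve_left hf
        rw [if_neg hf, if_neg hf]
        rw [ih a b (i + ca[i.toNat]) j ca cb
              (s ++ PySem.List.slice a (some i) (some (i + ca[i.toNat])))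
              (by omega) hca hcb hqa hqb]
        have hswap : pvBestB n a b ca cb false (PySem.Chars.findFrom b [a[i.toNat]] j none + 1) (i + ca[i.toNat])
            = pvBestB n b a cb ca true (PySem.Chars.findFrom b [a[i.toNat]] j none + 1) (i + ca[i.toNat]) := by
          simpa using pvBestB_swap n a b ca cb false (PySem.Chars.findFrom b [a[i.toNat]] j none + 1) (i + ca[i.toNat])
        rw [ih b a (PySem.Chars.findFrom b [a[i.toNat]] j none + 1) (i + ca[i.toNat]) cb ca
              (s ++ PySem.List.slice a (some i) (some (i + ca[i.toNat])))
              (by omega) hcb hca hqb hqa, ← hswap]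
        have hl1 := pvBestB_len n a b ca cb false (PySem.Chars.findFrom b [a[i.toNat]] j none + 1) (i + ca[i.toNat])
        have hl2 := pvBestB_len n a b ca cb true (i + ca[i.toNat]) j
        simp only [List.length_append]
        split_ifs with h1 h2 h2 <;> simp [List.append_assoc] <;> omega

-- ===== VERDICT (by name: the statement is the Claim_ definition above) =====
theorem get_string_spec : Claim_equal_get_string := by
  intro a b a_ind b_ind a_count b_count str _ hpre
  unfold Spec_get_string get_string get_string_alt
  rcases hpre with h | ⟨hi, hca, hcb, hqa, hqb⟩
  · have hb : ((a.length : Nat) : Int) ≤ a_ind := by simpa using h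
    simp [pvGsA, pvBestB, PySem.List.len_eq, hb]
  · rw [pvGsA_eq_bestB (a.toList.length + b.toList.length + 1) a.toList b.toList a_ind b_ind
        a_count b_count str.toList hi hca hcb hqa hqb]
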